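-- pv_equiv track=rewrite | github.com/chyfnuonuo/Algorithms_Fourth_Edition_study | Chapter1_Fundamentals/exercise_1.3.10.py | spit_num
-- ===== SOURCE A (Python) =====
-- def spit_num(expr):
--     result_list = []
--     temp = ''
--     for item in expr:
--
--         if item in ('0', '1', '2', '3', '4', '5', '6', '7', '8', '9'):
--             temp += item
--         else:
--             if len(temp) != 0:
--                 result_list.append(temp)
--                 temp = ''
--             result_list.append(item)
--     if len(temp) != 0:
--         result_list.append(temp)
--     return result_list
-- ===== SOURCE B (Python) =====
-- import re
--
-- def spit_num(expr):
--     # [0-9]+ captures each maximal digit run, [^0-9] each single other char.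
--     return re.findall(r'[0-9]+|[^0-9]', expr)
-- ===== Notes on version B (the rewrite author's own statement) =====
-- stated objective: idiomatic
-- what changed: Replaced the manual accumulator state machine (collect digits in temp, flush on non-digit and at the end) with a single re.findall over the pattern [0-9]+|[^0-9].
import Mathlib
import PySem

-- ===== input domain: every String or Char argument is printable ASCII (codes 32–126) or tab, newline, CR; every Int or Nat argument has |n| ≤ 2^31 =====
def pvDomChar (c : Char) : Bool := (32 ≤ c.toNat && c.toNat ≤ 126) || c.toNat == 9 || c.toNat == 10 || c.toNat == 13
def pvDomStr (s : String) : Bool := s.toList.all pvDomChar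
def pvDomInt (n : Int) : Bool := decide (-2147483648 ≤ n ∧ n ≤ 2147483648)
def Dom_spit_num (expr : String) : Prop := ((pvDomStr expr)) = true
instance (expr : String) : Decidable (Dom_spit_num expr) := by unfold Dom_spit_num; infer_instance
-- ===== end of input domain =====

-- B replaces A's manual accumulator state machine with one regex findall ([0-9]+|[^0-9]); objective: idiomatic.

-- ===== PORT A =====
-- A's loop state is (result_list, temp); temp is kept as List Char and turned into a String on append
def spitStepA (st : List String × List Char) (item : Char) : List String × List Char :=
  if item ∈ ['0','1','2','3','4','5','6','7','8','9'] then
    (st.1, st.2 ++ [item])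
  else if st.2.length ≠ 0 then
    (st.1 ++ [String.ofList st.2, String.ofList [item]], [])
  else
    (st.1 ++ [String.ofList [item]], st.2)

def spit_num (expr : String) : List String :=
  let st := expr.toList.foldl spitStepA ([], [])
  if st.2.length ≠ 0 then st.1 ++ [String.ofList st.2] else st.1

-- ===== PORT B =====
-- the regex character class [0-9]
def pvIsDigitB (c : Char) : Bool := '0' ≤ c && c ≤ '9'

-- hand port of re.findall(r'[0-9]+|[^0-9]', expr): at each position the [0-9]+ branch
-- greedily takes the maximal digit run, otherwise [^0-9] takes one character; exact on
-- every string since the pattern's matches tile the input left to right.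
def spitGoB : List Char → List String
  | [] => []
  | c :: cs =>
    if pvIsDigitB c then
      String.ofList (c :: cs.takeWhile pvIsDigitB) :: spitGoB (cs.dropWhile pvIsDigitB)
    else
      String.ofList [c] :: spitGoB cs
termination_by l => l.length
decreasing_by
  · simp only [List.length_cons]
    exact Nat.lt_succ_of_le (List.length_dropWhile_le _ _)
  · simp

def spit_num_alt (expr : String) : List String := spitGoB expr.toList

-- ===== PRECONDITION & SPEC =====
def Spec_spit_num (expr : String) (out : List String) : Prop := out = spit_num_alt expr
instance (expr : String) (out : List String) : Decidable (Spec_spit_num expr out) := by unfold Spec_spit_num; infer_instance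

-- ===== CLAIM (what is proved, stated in full; the proofs are below) =====
def Claim_equal_spit_num : Prop := ∀ (expr : String), Dom_spit_num expr → Spec_spit_num expr (spit_num expr)

-- ===== LEMMAS AND PROOFS =====

lemma char_eq_of_toNat {c d : Char} (h : c.toNat = d.toNat) : c = d :=
  Char.ext (UInt32.toNat_inj.mp h)

lemma mem_digits_iff (c : Char) :
    (c ∈ ['0','1','2','3','4','5','6','7','8','9']) ↔ pvIsDigitB c = true := by
  constructor
  · intro h; fin_cases h <;> decide
  · intro h
    simp only [pvIsDigitB, Bool.and_eq_true, decide_eq_true_eq] at h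
    obtain ⟨h1, h2⟩ := h
    have hn1 : 48 ≤ c.toNat := UInt32.le_iff_toNat_le.mp h1
    have hn2 : c.toNat ≤ 57 := UInt32.le_iff_toNat_le.mp h2
    have hd : c.toNat = 48 ∨ c.toNat = 49 ∨ c.toNat = 50 ∨ c.toNat = 51 ∨ c.toNat = 52 ∨
        c.toNat = 53 ∨ c.toNat = 54 ∨ c.toNat = 55 ∨ c.toNat = 56 ∨ c.toNat = 57 := by omega
    rcases hd with h|h|h|h|h|h|h|h|h|h <;>
      [ (have : c = '0' := char_eq_of_toNat (by rw [h]; rfl));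
        (have : c = '1' := char_eq_of_toNat (by rw [h]; rfl));
        (have : c = '2' := char_eq_of_toNat (by rw [h]; rfl));
        (have : c = '3' := char_eq_of_toNat (by rw [h]; rfl));
        (have : c = '4' := char_eq_of_toNat (by rw [h]; rfl));
        (have : c = '5' := char_eq_of_toNat (by rw [h]; rfl));
        (have : c = '6' := char_eq_of_toNat (by rw [h]; rfl));
        (have : c = '7' := char_eq_of_toNat (by rw [h]; rfl));
        (have : c = '8' := char_eq_of_toNat (by rw [h]; rfl));
        (have : c = '9' := char_eq_of_toNat (by rw [h]; rfl)) ] <;>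
      simp [this]

lemma spitGoB_nil : spitGoB [] = [] := by simp [spitGoB]

lemma spitGoB_cons_digit (c : Char) (cs : List Char) (hc : pvIsDigitB c = true) :
    spitGoB (c :: cs) =
      String.ofList (c :: cs.takeWhile pvIsDigitB) :: spitGoB (cs.dropWhile pvIsDigitB) := by
  rw [spitGoB, if_pos hc]

lemma spitGoB_cons_nondigit (c : Char) (cs : List Char) (hc : pvIsDigitB c = false) :
    spitGoB (c :: cs) = String.ofList [c] :: spitGoB cs := by
  rw [spitGoB, if_neg (by simp [hc])]

-- finishing step of A on a state
def spitFinA (st : List String × List Char) : List String :=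
  if st.2.length ≠ 0 then st.1 ++ [String.ofList st.2] else st.1

lemma spitGoB_all_digits (t : List Char) (ht : ∀ c ∈ t, pvIsDigitB c = true) (hne : t ≠ []) :
    spitGoB t = [String.ofList t] := by
  cases t with
  | nil => exact absurd rfl hne
  | cons c cs =>
    rw [spitGoB_cons_digit c cs (ht c (by simp))]
    have h1 : cs.takeWhile pvIsDigitB = cs :=
      List.takeWhile_eq_self_iff.mpr (fun x hx => ht x (by simp [hx]))
    have h2 : cs.dropWhile pvIsDigitB = [] := by
      rw [List.dropWhile_eq_nil_iff]
      exact fun x hx => ht x (by simp [hx])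
    rw [h1, h2, spitGoB_nil]

lemma spitGoB_prepend_digits (t : List Char) (ht : ∀ c ∈ t, pvIsDigitB c = true) (hne : t ≠ [])
    (c : Char) (hc : pvIsDigitB c = false) (cs : List Char) :
    spitGoB (t ++ c :: cs) = String.ofList t :: spitGoB (c :: cs) := by
  cases t with
  | nil => exact absurd rfl hne
  | cons d ds =>
    rw [List.cons_append, spitGoB_cons_digit d _ (ht d (by simp))]
    have hta : ds.takeWhile pvIsDigitB = ds :=
      List.takeWhile_eq_self_iff.mpr (fun x hx => ht x (by simp [hx]))
    have hda : ds.dropWhile pvIsDigitB = [] :=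
      List.dropWhile_eq_nil_iff.mpr (fun x hx => ht x (by simp [hx]))
    have h1 : (ds ++ c :: cs).takeWhile pvIsDigitB = ds := by
      rw [List.takeWhile_append, hta]
      simp [hc]
    have h2 : (ds ++ c :: cs).dropWhile pvIsDigitB = c :: cs := by
      rw [List.dropWhile_append, hda]
      simp [hc]
    rw [h1, h2]

-- main invariant: running A's loop from state (acc, temp) and finishing gives acc ++ B's scan of temp ++ cs
lemma spit_inv (cs : List Char) : ∀ (acc : List String) (temp : List Char),
    (∀ c ∈ temp, pvIsDigitB c = true) →
    spitFinA (cs.foldl spitStepA (acc, temp)) = acc ++ spitGoB (temp ++ cs) := by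
  induction cs with
  | nil =>
    intro acc temp ht
    simp only [List.foldl_nil, List.append_nil, spitFinA]
    by_cases h : temp = []
    · subst h; simp [spitGoB_nil]
    · rw [spitGoB_all_digits temp ht h]
      simp [h]
  | cons c cs ih =>
    intro acc temp ht
    rw [List.foldl_cons]
    by_cases hc : pvIsDigitB c = true
    · rw [show spitStepA (acc, temp) c = (acc, temp ++ [c]) from by
        simp [spitStepA, (mem_digits_iff c).mpr hc]]
      rw [ih acc (temp ++ [c]) (by intro x hx; rcases List.mem_append.mp hx with h | h
                                   · exact ht x h
                                   · simp at h; subst h; exact hc)]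
      simp
    · have hcm : c ∉ ['0','1','2','3','4','5','6','7','8','9'] := fun h => hc ((mem_digits_iff c).mp h)
      rw [Bool.not_eq_true] at hc
      by_cases h : temp = []
      · subst h
        rw [show spitStepA (acc, []) c = (acc ++ [String.ofList [c]], []) from by simp [spitStepA, hcm]]
        rw [ih _ [] (by simp)]
        rw [List.nil_append, List.nil_append, spitGoB_cons_nondigit c cs hc]
        simp
      · rw [show spitStepA (acc, temp) c = (acc ++ [String.ofList temp, String.ofList [c]], []) from by
          simp [spitStepA, hcm, h]]
        rw [ih _ [] (by simp)]
        rw [List.nil_append, spitGoB_prepend_digits temp ht h c hc cs,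
            spitGoB_cons_nondigit c cs hc]
        simp

-- ===== VERDICT (by name: the statement is the Claim_ definition above) =====
theorem spit_num_spec : Claim_equal_spit_num := by
  intro expr _
  unfold Spec_spit_num spit_num spit_num_alt
  have h := spit_inv expr.toList [] [] (by simp)
  rw [spitFinA, List.nil_append, List.nil_append] at h
  simpa using h
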